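-- pv_equiv track=rewrite | github.com/Ravi-0412/DSA-Program-And-Notes | Array/Count distinct connections.py | count_connections
-- ===== SOURCE A (Python) =====
-- def count_connections(matrix):
--     m, n = len(matrix), len(matrix[0])
--     count = 0
--     dirs = [(-1,-1), (-1, 0), (-1, 1), (0, -1), (0, 1), (1, -1), (1, 0), (1, 1)]
--     for i in range(m):
--         for j in range(n):
--             if matrix[i][j] == 1:
--                 for dx, dy in dirs:
--                     ni, nj = i + dx, j + dy
--                     if 0 <= ni < m and 0 <= nj < n and matrix[ni][nj] == 1:
--                         count += 1
--             matrix[i][j] = 0   # marking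
--     return count
-- ===== SOURCE B (Python) =====
-- def count_connections(matrix):
--     n = len(matrix[0])
--     rows = [row[:n] for row in matrix]
--     count = 0
--     for r in rows:
--         for a, b in zip(r, r[1:]):
--             if a == 1 and b == 1:
--                 count += 1
--     for r1, r2 in zip(rows, rows[1:]):
--         for a, b in zip(r1, r2):
--             if a == 1 and b == 1:
--                 count += 1
--         for a, b in zip(r1, r2[1:]):
--             if a == 1 and b == 1:
--                 count += 1
--         for a, b in zip(r1[1:], r2):
--             if a == 1 and b == 1:
--                 count += 1
--     for row in matrix:
--         row[:n] = [0] * n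
--     return count
-- ===== Notes on version B (the rewrite author's own statement) =====
-- stated objective: alternative
-- what changed: B replaces A's per-cell 8-direction bound-checked scan with destructive zeroing for de-duplication by a zip-based pairwise scan: horizontal pairs inside each row and vertical/diagonal/anti-diagonal pairs between consecutive rows, each adjacency counted once with no index arithmetic or bound checks; the matrix is zeroed in a separate pass to reproduce A's in-place mutation.
import Mathlib
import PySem

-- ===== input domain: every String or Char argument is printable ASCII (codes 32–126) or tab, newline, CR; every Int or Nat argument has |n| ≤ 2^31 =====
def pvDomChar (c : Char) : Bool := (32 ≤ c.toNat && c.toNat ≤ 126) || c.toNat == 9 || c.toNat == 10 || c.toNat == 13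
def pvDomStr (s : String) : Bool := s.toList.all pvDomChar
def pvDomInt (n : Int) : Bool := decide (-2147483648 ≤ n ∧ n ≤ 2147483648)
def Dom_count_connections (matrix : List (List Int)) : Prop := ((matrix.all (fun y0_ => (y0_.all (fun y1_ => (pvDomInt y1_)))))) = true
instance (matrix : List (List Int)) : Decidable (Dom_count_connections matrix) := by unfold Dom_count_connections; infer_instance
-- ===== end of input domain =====

-- B counts each adjacency once by zipping each row with its own tail (horizontal) and consecutive row
-- pairs (vertical, diagonal, anti-diagonal), instead of A's per-cell 8-direction bound-checked scan that
-- de-duplicates by destructively zeroing visited cells (alternative decomposition, same cost). The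
-- equivalence proved is about the RETURN value; Source B performs the same in-place zeroing of the matrix as A.

-- ===== PORT A =====
def pvRd (mat : List (List Int)) (i j : Int) : Int :=
  (PySem.List.pyGet? ((PySem.List.pyGet? mat i).getD []) j).getD 0

def pvWr (mat : List (List Int)) (i j : Nat) : List (List Int) :=
  mat.set i ((mat.getD i []).set j 0)

def pvDirsA : List (Int × Int) :=
  [(-1,-1), (-1, 0), (-1, 1), (0, -1), (0, 1), (1, -1), (1, 0), (1, 1)]

def pvCellA (m n : Nat) (i j : Nat) (st : List (List Int) × Int) : List (List Int) × Int :=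
  let cnt :=
    if pvRd st.1 i j = 1 then
      pvDirsA.foldl (fun c d =>
        let ni : Int := (i : Int) + d.1
        let nj : Int := (j : Int) + d.2
        if 0 ≤ ni ∧ ni < (m : Int) ∧ 0 ≤ nj ∧ nj < (n : Int) ∧ pvRd st.1 ni nj = 1
        then c + 1 else c) st.2
    else st.2
  (pvWr st.1 i j, cnt)

def count_connections (matrix : List (List Int)) : Int :=
  let m := matrix.length
  let n := (matrix.headD []).length
  ((List.range m).foldl
    (fun st i => (List.range n).foldl (fun st j => pvCellA m n i j st) st)
    (matrix, 0)).2

-- ===== PORT B =====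
def pvPairs (xs ys : List Int) : Int :=
  (xs.zip ys).foldl (fun c p => if p.1 = 1 ∧ p.2 = 1 then c + 1 else c) 0

def count_connections_alt (matrix : List (List Int)) : Int :=
  let n := (matrix.headD []).length
  let rows := matrix.map (fun r => r.take n)
  let h := rows.foldl (fun c r => c + pvPairs r (r.drop 1)) 0
  let v := (rows.zip (rows.drop 1)).foldl
      (fun c p => c + pvPairs p.1 p.2 + pvPairs p.1 (p.2.drop 1) + pvPairs (p.1.drop 1) p.2) 0
  h + v

-- ===== PRECONDITION & SPEC =====
-- A raises IndexError on the empty matrix (len(matrix[0])) and whenever some row is shorter than row 0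
-- (matrix[i][j] / matrix[ni][nj] for j < len(matrix[0])); Pre_ excludes exactly those inputs.
def Pre_count_connections (matrix : List (List Int)) : Prop :=
  matrix ≠ [] ∧ ∀ row ∈ matrix, (matrix.headD []).length ≤ row.length

instance (matrix : List (List Int)) : Decidable (Pre_count_connections matrix) := by
  unfold Pre_count_connections; infer_instance

def pvWitness_count_connections : List (List Int) := [[1, 1, 0], [0, 1, 1]]

def Spec_count_connections (matrix : List (List Int)) (out : Int) : Prop := out = count_connections_alt matrix
instance (matrix : List (List Int)) (out : Int) : Decidable (Spec_count_connections matrix out) := by unfold Spec_count_connections; infer_instance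

-- ===== CLAIM (what is proved, stated in full; the proofs are below) =====
def Claim_equal_count_connections : Prop := ∀ (matrix : List (List Int)), Dom_count_connections matrix → Pre_count_connections matrix → Spec_count_connections matrix (count_connections matrix)

-- ===== LEMMAS AND PROOFS =====

-- ---- A-side: reduce A's destructive fold to a per-cell forward-neighbour sum ----

def pvFwd : List (Int × Int) := [(0, 1), (1, -1), (1, 0), (1, 1)]

def pvCellB (matrix : List (List Int)) (m n : Nat) (i j : Nat) : Int :=
  if pvRd matrix i j = 1 then
    pvFwd.foldl (fun c d =>
      let ni : Int := (i : Int) + d.1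
      let nj : Int := (j : Int) + d.2
      if 0 ≤ ni ∧ ni < (m : Int) ∧ 0 ≤ nj ∧ nj < (n : Int) ∧ pvRd matrix ni nj = 1
      then c + 1 else c) 0
  else 0

def pvZ (M : List (List Int)) (n k : Nat) : List (List Int) :=
  M.mapIdx (fun i row => row.mapIdx (fun j v => if i * n + j < k ∧ j < n then 0 else v))

theorem pvZ_zero (M : List (List Int)) (n : Nat) : pvZ M n 0 = M := by
  unfold pvZ
  apply List.ext_getElem (by simp)
  intro i h1 h2
  simp only [List.getElem_mapIdx]
  apply List.ext_getElem (by simp)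
  intro j h3 h4
  simp

theorem pvZ_getElem (M : List (List Int)) (n k i : Nat) (hi : i < M.length) :
    (pvZ M n k)[i]'(by simp [pvZ]; omega)
      = (M[i]).mapIdx (fun j v => if i * n + j < k ∧ j < n then 0 else v) := by
  simp [pvZ]

theorem pvRd_nat (M : List (List Int)) (i j : Nat) (hi : i < M.length)
    (hj : j < M[i].length) : pvRd M i j = M[i][j] := by
  simp [pvRd, hi, hj]

theorem pvRd_z (M : List (List Int)) (n k : Nat) (i j : Nat) (hi : i < M.length)
    (hj : j < M[i].length) :
    pvRd (pvZ M n k) (i : Int) (j : Int) = if i * n + j < k ∧ j < n then 0 else M[i][j] := by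
  have hi' : i < (pvZ M n k).length := by simp [pvZ]; omega
  have hj' : j < ((pvZ M n k)[i]'hi').length := by
    rw [pvZ_getElem M n k i hi]; simpa using hj
  rw [pvRd_nat _ _ _ hi' hj']
  have := pvZ_getElem M n k i hi
  simp [this]

theorem pvLin_inj {i i' j j' n : Nat} (hj : j < n) (hj' : j' < n)
    (h : i' * n + j' = i * n + j) : i' = i ∧ j' = j := by
  rcases Nat.lt_trichotomy i' i with hlt | heq | hgt
  · have h1 : (i' + 1) * n ≤ i * n := Nat.mul_le_mul_right n hlt
    rw [Nat.add_mul, Nat.one_mul] at h1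
    omega
  · subst heq; omega
  · have h1 : (i + 1) * n ≤ i' * n := Nat.mul_le_mul_right n hgt
    rw [Nat.add_mul, Nat.one_mul] at h1
    omega

theorem pvWr_z (M : List (List Int)) (n i j : Nat) (hi : i < M.length) (hj : j < n)
    (hjr : j < M[i].length) :
    pvWr (pvZ M n (i * n + j)) i j = pvZ M n (i * n + j + 1) := by
  have hi' : i < (pvZ M n (i*n+j)).length := by simp [pvZ]; omega
  apply List.ext_getElem (by simp [pvWr, pvZ])
  intro i' h1 h2
  have hi'' : i' < M.length := by simpa [pvZ] using h2
  simp only [pvWr]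
  by_cases hii : i' = i
  · subst hii
    rw [List.getElem_set_self (by simpa [pvZ] using hi'')]
    have hget : (pvZ M n (i'*n+j)).getD i' [] = (pvZ M n (i'*n+j))[i']'(by simp [pvZ]; omega) := by
      rw [List.getD, List.getElem?_eq_getElem]; rfl
    rw [hget, pvZ_getElem M n _ i' hi'', pvZ_getElem M n _ i' hi'']
    apply List.ext_getElem (by simp)
    intro j' h3 h4
    simp only [List.getElem_mapIdx]
    by_cases hjj : j' = j
    · subst hjj
      rw [List.getElem_set_self (by simpa using h4)]
      simp; omega
    · rw [List.getElem_set_ne (by omega)]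
      simp only [List.getElem_mapIdx]
      have : (i' * n + j' < i' * n + j ∧ j' < n) ↔ (i' * n + j' < i' * n + j + 1 ∧ j' < n) := by
        constructor <;> rintro ⟨h5, h6⟩ <;> exact ⟨by omega, h6⟩
      rw [if_congr this rfl rfl]
  · rw [List.getElem_set_ne (by omega)]
    rw [pvZ_getElem M n _ i' hi'', pvZ_getElem M n _ i' hi'']
    apply List.ext_getElem (by simp)
    intro j' h3 h4
    simp only [List.getElem_mapIdx]
    have hx : (i' * n + j' < i * n + j ∧ j' < n) ↔ (i' * n + j' < i * n + j + 1 ∧ j' < n) := by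
      constructor
      · rintro ⟨h5, h6⟩; exact ⟨by omega, h6⟩
      · rintro ⟨h5, h6⟩
        refine ⟨?_, h6⟩
        rcases Nat.lt_or_ge (i' * n + j') (i * n + j) with hlt | hge
        · exact hlt
        · have hx2 : i' * n + j' = i * n + j := by omega
          exact absurd (pvLin_inj hj h6 hx2).1 hii
    rw [if_congr hx rfl rfl]

theorem pvRd_z_back (M : List (List Int)) (n k : Nat) (hrow : ∀ r ∈ M, n ≤ r.length)
    (a b : Nat) (ha : a < M.length) (hb : b < n) (hk : a * n + b < k) :
    pvRd (pvZ M n k) (a : Int) (b : Int) = 0 := by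
  have hjl : b < M[a].length := by have := hrow M[a] (List.getElem_mem ha); omega
  rw [pvRd_z M n k a b ha hjl, if_pos ⟨hk, hb⟩]

theorem pvRd_z_fwd (M : List (List Int)) (n k : Nat) (hrow : ∀ r ∈ M, n ≤ r.length)
    (a b : Nat) (ha : a < M.length) (hb : b < n) (hk : k ≤ a * n + b) :
    pvRd (pvZ M n k) (a : Int) (b : Int) = pvRd M (a : Int) (b : Int) := by
  have hjl : b < M[a].length := by have := hrow M[a] (List.getElem_mem ha); omega
  rw [pvRd_z M n k a b ha hjl, if_neg (by omega), pvRd_nat M a b ha hjl]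

theorem pvStep (M : List (List Int)) (n : Nat)
    (hrow : ∀ r ∈ M, n ≤ r.length) (i j : Nat) (hi : i < M.length) (hj : j < n) (c : Int) :
    pvCellA M.length n i j (pvZ M n (i * n + j), c)
      = (pvZ M n (i * n + j + 1), c + pvCellB M M.length n i j) := by
  have hjr : j < M[i].length := by have := hrow M[i] (List.getElem_mem hi); omega
  have hz : pvRd (pvZ M n (i * n + j)) (i : Int) (j : Int) = M[i][j] := by
    rw [pvRd_z M n _ i j hi hjr, if_neg (by omega)]
  have hM : pvRd M (i : Int) (j : Int) = M[i][j] := pvRd_nat M i j hi hjr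
  simp only [pvCellA, pvCellB, pvDirsA, pvFwd, List.foldl_cons, List.foldl_nil, hz, hM]
  simp only [Prod.mk.injEq]
  refine ⟨pvWr_z M n i j hi hj hjr, ?_⟩
  have hmul1 : (i - 1) * n + n = i * n ∨ i = 0 := by
    rcases Nat.eq_zero_or_pos i with h0 | h0
    · exact Or.inr h0
    · left
      have h9 : i - 1 + 1 = i := by omega
      calc (i - 1) * n + n = (i - 1 + 1) * n := by ring
        _ = i * n := by rw [h9]
  have hmul2 : (i + 1) * n = i * n + n := by ring
  have b1 : ¬(0 ≤ (i:Int) + -1 ∧ (i:Int) + -1 < (M.length:Int) ∧ 0 ≤ (j:Int) + -1 ∧ (j:Int) + -1 < (n:Int) ∧ pvRd (pvZ M n (i * n + j)) ((i:Int) + -1) ((j:Int) + -1) = 1) := by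
    rintro ⟨g1, g2, g3, g4, g5⟩
    have c1 : ((i:Int) + -1) = ((i - 1 : Nat) : Int) := by omega
    have c2 : ((j:Int) + -1) = ((j - 1 : Nat) : Int) := by omega
    rw [c1, c2, pvRd_z_back M n _ hrow (i-1) (j-1) (by omega) (by omega) (by rcases hmul1 with h | h <;> omega)] at g5
    exact absurd g5 (by decide)
  have b2 : ¬(0 ≤ (i:Int) + -1 ∧ (i:Int) + -1 < (M.length:Int) ∧ 0 ≤ (j:Int) + 0 ∧ (j:Int) + 0 < (n:Int) ∧ pvRd (pvZ M n (i * n + j)) ((i:Int) + -1) ((j:Int) + 0) = 1) := by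
    rintro ⟨g1, g2, g3, g4, g5⟩
    have c1 : ((i:Int) + -1) = ((i - 1 : Nat) : Int) := by omega
    have c2 : ((j:Int) + 0) = ((j : Nat) : Int) := by omega
    rw [c1, c2, pvRd_z_back M n _ hrow (i-1) j (by omega) (by omega) (by rcases hmul1 with h | h <;> omega)] at g5
    exact absurd g5 (by decide)
  have b3 : ¬(0 ≤ (i:Int) + -1 ∧ (i:Int) + -1 < (M.length:Int) ∧ 0 ≤ (j:Int) + 1 ∧ (j:Int) + 1 < (n:Int) ∧ pvRd (pvZ M n (i * n + j)) ((i:Int) + -1) ((j:Int) + 1) = 1) := by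
    rintro ⟨g1, g2, g3, g4, g5⟩
    have c1 : ((i:Int) + -1) = ((i - 1 : Nat) : Int) := by omega
    have c2 : ((j:Int) + 1) = ((j + 1 : Nat) : Int) := by omega
    rw [c1, c2, pvRd_z_back M n _ hrow (i-1) (j+1) (by omega) (by omega) (by rcases hmul1 with h | h <;> omega)] at g5
    exact absurd g5 (by decide)
  have b4 : ¬(0 ≤ (i:Int) + 0 ∧ (i:Int) + 0 < (M.length:Int) ∧ 0 ≤ (j:Int) + -1 ∧ (j:Int) + -1 < (n:Int) ∧ pvRd (pvZ M n (i * n + j)) ((i:Int) + 0) ((j:Int) + -1) = 1) := by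
    rintro ⟨g1, g2, g3, g4, g5⟩
    have c1 : ((i:Int) + 0) = ((i : Nat) : Int) := by omega
    have c2 : ((j:Int) + -1) = ((j - 1 : Nat) : Int) := by omega
    rw [c1, c2, pvRd_z_back M n _ hrow i (j-1) (by omega) (by omega) (by omega)] at g5
    exact absurd g5 (by decide)
  have f5 : ((0 ≤ (i:Int) + 0 ∧ (i:Int) + 0 < (M.length:Int) ∧ 0 ≤ (j:Int) + 1 ∧ (j:Int) + 1 < (n:Int) ∧ pvRd (pvZ M n (i * n + j)) ((i:Int) + 0) ((j:Int) + 1) = 1) ↔ (0 ≤ (i:Int) + 0 ∧ (i:Int) + 0 < (M.length:Int) ∧ 0 ≤ (j:Int) + 1 ∧ (j:Int) + 1 < (n:Int) ∧ pvRd M ((i:Int) + 0) ((j:Int) + 1) = 1)) := by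
    have c1 : ((i:Int) + 0) = ((i : Nat) : Int) := by omega
    have c2 : ((j:Int) + 1) = ((j + 1 : Nat) : Int) := by omega
    constructor <;> rintro ⟨g1, g2, g3, g4, g5⟩ <;> refine ⟨g1, g2, g3, g4, ?_⟩ <;>
      rw [c1, c2] at g5 ⊢ <;>
      rw [pvRd_z_fwd M n _ hrow i (j+1) (by omega) (by omega) (by omega)] at * <;>
      exact g5
  have f6 : ((0 ≤ (i:Int) + 1 ∧ (i:Int) + 1 < (M.length:Int) ∧ 0 ≤ (j:Int) + -1 ∧ (j:Int) + -1 < (n:Int) ∧ pvRd (pvZ M n (i * n + j)) ((i:Int) + 1) ((j:Int) + -1) = 1) ↔ (0 ≤ (i:Int) + 1 ∧ (i:Int) + 1 < (M.length:Int) ∧ 0 ≤ (j:Int) + -1 ∧ (j:Int) + -1 < (n:Int) ∧ pvRd M ((i:Int) + 1) ((j:Int) + -1) = 1)) := by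
    constructor <;> rintro ⟨g1, g2, g3, g4, g5⟩ <;> refine ⟨g1, g2, g3, g4, ?_⟩ <;>
      have c1 : ((i:Int) + 1) = ((i + 1 : Nat) : Int) := by omega
    all_goals have c2 : ((j:Int) + -1) = ((j - 1 : Nat) : Int) := by omega
    all_goals rw [c1, c2] at g5 ⊢
    all_goals rw [pvRd_z_fwd M n _ hrow (i+1) (j-1) (by omega) (by omega) (by omega)] at *
    all_goals exact g5
  have f7 : ((0 ≤ (i:Int) + 1 ∧ (i:Int) + 1 < (M.length:Int) ∧ 0 ≤ (j:Int) + 0 ∧ (j:Int) + 0 < (n:Int) ∧ pvRd (pvZ M n (i * n + j)) ((i:Int) + 1) ((j:Int) + 0) = 1) ↔ (0 ≤ (i:Int) + 1 ∧ (i:Int) + 1 < (M.length:Int) ∧ 0 ≤ (j:Int) + 0 ∧ (j:Int) + 0 < (n:Int) ∧ pvRd M ((i:Int) + 1) ((j:Int) + 0) = 1)) := by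
    constructor <;> rintro ⟨g1, g2, g3, g4, g5⟩ <;> refine ⟨g1, g2, g3, g4, ?_⟩ <;>
      have c1 : ((i:Int) + 1) = ((i + 1 : Nat) : Int) := by omega
    all_goals have c2 : ((j:Int) + 0) = ((j : Nat) : Int) := by omega
    all_goals rw [c1, c2] at g5 ⊢
    all_goals rw [pvRd_z_fwd M n _ hrow (i+1) j (by omega) (by omega) (by omega)] at *
    all_goals exact g5
  have f8 : ((0 ≤ (i:Int) + 1 ∧ (i:Int) + 1 < (M.length:Int) ∧ 0 ≤ (j:Int) + 1 ∧ (j:Int) + 1 < (n:Int) ∧ pvRd (pvZ M n (i * n + j)) ((i:Int) + 1) ((j:Int) + 1) = 1) ↔ (0 ≤ (i:Int) + 1 ∧ (i:Int) + 1 < (M.length:Int) ∧ 0 ≤ (j:Int) + 1 ∧ (j:Int) + 1 < (n:Int) ∧ pvRd M ((i:Int) + 1) ((j:Int) + 1) = 1)) := by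
    constructor <;> rintro ⟨g1, g2, g3, g4, g5⟩ <;> refine ⟨g1, g2, g3, g4, ?_⟩ <;>
      have c1 : ((i:Int) + 1) = ((i + 1 : Nat) : Int) := by omega
    all_goals have c2 : ((j:Int) + 1) = ((j + 1 : Nat) : Int) := by omega
    all_goals rw [c1, c2] at g5 ⊢
    all_goals rw [pvRd_z_fwd M n _ hrow (i+1) (j+1) (by omega) (by omega) (by omega)] at *
    all_goals exact g5
  simp only [b1, b2, b3, b4, f5, f6, f7, f8, if_false]
  by_cases hv : M[i][j] = 1
  · simp only [if_pos hv]
    split_ifs <;> omega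
  · simp only [if_neg hv]
    omega

theorem pvInner (M : List (List Int)) (n : Nat) (hrow : ∀ r ∈ M, n ≤ r.length)
    (i : Nat) (hi : i < M.length) :
    ∀ t j c, j + t = n →
      (List.range' j t).foldl (fun st j => pvCellA M.length n i j st) (pvZ M n (i * n + j), c)
        = (pvZ M n (i * n + j + t),
           c + ((List.range' j t).map (pvCellB M M.length n i)).sum) := by
  intro t
  induction t with
  | zero => intro j c h; simp
  | succ t ih =>
    intro j c h
    rw [List.range'_succ]
    simp only [List.foldl_cons, List.map_cons, List.sum_cons]
    rw [pvStep M n hrow i j hi (by omega) c]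
    rw [show i * n + j + 1 = i * n + (j + 1) from by omega]
    rw [ih (j + 1) (c + pvCellB M M.length n i j) (by omega)]
    simp only [Prod.mk.injEq]
    exact ⟨by congr 1; omega, by ring⟩

theorem pvOuter (M : List (List Int)) (n : Nat) (hrow : ∀ r ∈ M, n ≤ r.length) :
    ∀ t i c, i + t = M.length →
      (List.range' i t).foldl
          (fun st i => (List.range n).foldl (fun st j => pvCellA M.length n i j st) st)
          (pvZ M n (i * n), c)
        = (pvZ M n ((i + t) * n),
           c + ((List.range' i t).map
                 (fun i => ((List.range n).map (pvCellB M M.length n i)).sum)).sum) := by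
  intro t
  induction t with
  | zero => intro i c h; simp
  | succ t ih =>
    intro i c h
    rw [List.range'_succ]
    simp only [List.foldl_cons, List.map_cons, List.sum_cons]
    rw [List.range_eq_range']
    rw [show pvZ M n (i * n) = pvZ M n (i * n + 0) from by rw [Nat.add_zero]]
    rw [pvInner M n hrow i (by omega) n 0 c (by omega)]
    rw [show i * n + 0 + n = (i + 1) * n from by ring]
    rw [← List.range_eq_range']
    rw [ih (i + 1) _ (by omega)]
    simp only [Prod.mk.injEq]
    exact ⟨by rw [show i + 1 + t = i + (t + 1) from by omega], by ring⟩

theorem pvA_sum (matrix : List (List Int))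
    (hrow : ∀ row ∈ matrix, (matrix.headD []).length ≤ row.length) :
    count_connections matrix
      = ((List.range matrix.length).map
          (fun i => ((List.range (matrix.headD []).length).map
            (pvCellB matrix matrix.length (matrix.headD []).length i)).sum)).sum := by
  simp only [count_connections]
  rw [show List.range matrix.length = List.range' 0 matrix.length from List.range_eq_range']
  rw [show (matrix, (0:Int)) = (pvZ matrix (matrix.headD []).length (0 * (matrix.headD []).length), (0:Int)) from by
    rw [Nat.zero_mul, pvZ_zero]]
  rw [pvOuter matrix (matrix.headD []).length hrow matrix.length 0 0 (by omega)]
  simp [← List.range_eq_range']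

-- ---- B-side: reduce B's zip scans to indexed sums and match them with pvCellB ----

def pvG (M : List (List Int)) (m n : Nat) (i j : Nat) (a b : Int) : Int :=
  if pvRd M i j = 1 ∧ 0 ≤ (i:Int) + a ∧ (i:Int) + a < (m:Int) ∧ 0 ≤ (j:Int) + b ∧ (j:Int) + b < (n:Int)
      ∧ pvRd M ((i:Int) + a) ((j:Int) + b) = 1 then 1 else 0

def pvW (matrix : List (List Int)) (n i : Nat) : List Int := (matrix.getD i []).take n

theorem pvZipSum {α : Type} (d : α) (f : α → α → Int) :
    ∀ (xs ys : List α), ((xs.zip ys).map (fun p => f p.1 p.2)).sum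
      = ((List.range (min xs.length ys.length)).map (fun j => f (xs.getD j d) (ys.getD j d))).sum := by
  intro xs
  induction xs with
  | nil => intro ys; simp
  | cons x xs ih =>
    intro ys
    cases ys with
    | nil => simp
    | cons y ys =>
      simp only [List.zip_cons_cons, List.map_cons, List.sum_cons, List.length_cons]
      rw [show min (xs.length + 1) (ys.length + 1) = min xs.length ys.length + 1 from by omega]
      rw [List.range_succ_eq_map]
      simp only [List.map_cons, List.sum_cons, List.map_map]
      rw [ih ys]
      have heq : (List.map ((fun j => f ((x :: xs).getD j d) ((y :: ys).getD j d)) ∘ Nat.succ)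
            (List.range (min xs.length ys.length)))
          = List.map (fun j => f (xs.getD j d) (ys.getD j d)) (List.range (min xs.length ys.length)) := by
        apply List.map_congr_left
        intro j hj
        simp [List.getD]
      rw [heq]
      simp [List.getD]

theorem pvPairs_sum (xs ys : List Int) :
    pvPairs xs ys
      = ((List.range (min xs.length ys.length)).map
          (fun j => if xs.getD j 0 = 1 ∧ ys.getD j 0 = 1 then (1:Int) else 0)).sum := by
  unfold pvPairs
  have hf : (fun (c : Int) (p : Int × Int) => if p.1 = 1 ∧ p.2 = 1 then c + 1 else c)
      = (fun c p => c + (if p.1 = 1 ∧ p.2 = 1 then (1:Int) else 0)) := by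
    funext c p; split <;> ring
  rw [hf, PySem.List.foldl_add]
  rw [show ((xs.zip ys).map fun p => if p.1 = 1 ∧ p.2 = 1 then (1:Int) else 0)
      = ((xs.zip ys).map fun p => (fun a b => if a = 1 ∧ b = 1 then (1:Int) else 0) p.1 p.2) from rfl]
  rw [pvZipSum 0 (fun a b => if a = 1 ∧ b = 1 then (1:Int) else 0) xs ys]
  simp

theorem pvSumGuard (k n : Nat) (h : k ≤ n) (f : Nat → Int) :
    ((List.range n).map (fun j => if j < k then f j else 0)).sum = ((List.range k).map f).sum := by
  induction n with
  | zero => have : k = 0 := by omega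
            subst this; simp
  | succ n ih =>
    by_cases hk : k = n + 1
    · subst hk
      apply congrArg
      apply List.map_congr_left
      intro j hj
      simp only [List.mem_range] at hj
      simp [hj]
    · have hk' : k ≤ n := by omega
      rw [List.range_succ, List.map_append, List.sum_append]
      simp only [List.map_cons, List.map_nil, List.sum_cons, List.sum_nil]
      rw [if_neg (by omega)]
      rw [ih hk']
      ring

theorem pvSumShift (n : Nat) (f : Nat → Int) (h0 : n ≠ 0 → f 0 = 0) :
    ((List.range n).map f).sum = ((List.range (n-1)).map (fun j => f (j+1))).sum := by
  cases n with
  | zero => simp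
  | succ n =>
    rw [List.range_succ_eq_map]
    simp only [List.map_cons, List.sum_cons, List.map_map]
    rw [h0 (by omega)]
    simp only [Nat.add_sub_cancel, zero_add]
    have heq : List.map (f ∘ Nat.succ) (List.range n)
        = List.map (fun j => f (j + 1)) (List.range n) := by
      apply List.map_congr_left
      intro j hj
      simp [Nat.succ_eq_add_one]
    rw [heq]

theorem pvCellB_split (M : List (List Int)) (m n : Nat) (i j : Nat) :
    pvCellB M m n i j
      = pvG M m n i j 0 1 + pvG M m n i j 1 (-1) + pvG M m n i j 1 0 + pvG M m n i j 1 1 := by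
  simp only [pvCellB, pvFwd, pvG, List.foldl_cons, List.foldl_nil]
  by_cases hv : pvRd M (i:Int) (j:Int) = 1
  · simp only [hv, if_pos, true_and]
    split_ifs <;> omega
  · simp only [hv, false_and, if_false]
    norm_num

-- basic getD facts
theorem pvGetD_at {α : Type} (L : List α) (d : α) (i : Nat) (hi : i < L.length) :
    L.getD i d = L[i] := by
  rw [List.getD, List.getElem?_eq_getElem hi]; rfl

theorem pvDropD {α : Type} (l : List α) (d : α) (j : Nat) :
    (l.drop 1).getD j d = l.getD (j+1) d := by
  rw [List.getD, List.getD, List.getElem?_drop, show 1+j = j+1 from by omega]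

theorem pvW_len (M : List (List Int)) (n i : Nat) (hrow : ∀ r ∈ M, n ≤ r.length)
    (hi : i < M.length) : (pvW M n i).length = n := by
  have h := hrow M[i] (List.getElem_mem hi)
  rw [pvW, pvGetD_at M [] i hi]
  simp; omega

theorem pvW_getD (M : List (List Int)) (n i j : Nat) (hrow : ∀ r ∈ M, n ≤ r.length)
    (hi : i < M.length) (hj : j < n) : (pvW M n i).getD j 0 = pvRd M i j := by
  have h := hrow M[i] (List.getElem_mem hi)
  rw [pvW, pvGetD_at M [] i hi, pvRd_nat M i j hi (by omega), List.getD,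
    List.getElem?_take_of_lt hj, List.getElem?_eq_getElem (by omega : j < M[i].length)]
  rfl

theorem pvRowH (M : List (List Int)) (n i : Nat) (hrow : ∀ r ∈ M, n ≤ r.length)
    (hi : i < M.length) :
    ((List.range n).map (fun j => pvG M M.length n i j 0 1)).sum
      = pvPairs (pvW M n i) ((pvW M n i).drop 1) := by
  rw [pvPairs_sum]
  have hw := pvW_len M n i hrow hi
  rw [show min (pvW M n i).length ((pvW M n i).drop 1).length = n - 1 from by
    simp [hw]]
  have hL : ∀ j ∈ List.range n, pvG M M.length n i j 0 1
      = (fun j => if j < n - 1 then (if pvRd M i j = 1 ∧ pvRd M i ((j+1:Nat)) = 1 then (1:Int) else 0) else 0) j := by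
    intro j hj
    have hjn : j < n := List.mem_range.mp hj
    dsimp only
    by_cases hb : j < n - 1
    · rw [if_pos hb]
      simp only [pvG, add_zero]
      rw [show ((j:Int) + 1) = (((j+1:Nat)):Int) from by push_cast; ring]
      refine if_congr ?_ rfl rfl
      constructor
      · rintro ⟨h1, _, _, _, _, h6⟩; exact ⟨h1, h6⟩
      · rintro ⟨h1, h6⟩; exact ⟨h1, by omega, by omega, by omega, by omega, h6⟩
    · rw [if_neg hb]
      simp only [pvG]
      rw [if_neg]
      rintro ⟨_, _, _, _, h5, _⟩; omega
  have hmap : (List.range n).map (fun j => pvG M M.length n i j 0 1)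
      = (List.range n).map (fun j => if j < n - 1 then (if pvRd M i j = 1 ∧ pvRd M i ((j+1:Nat)) = 1 then (1:Int) else 0) else 0) :=
    List.map_congr_left hL
  rw [hmap, pvSumGuard (n-1) n (by omega)]
  apply congrArg
  apply List.map_congr_left
  intro j hj
  have hjn : j < n - 1 := List.mem_range.mp hj
  rw [pvW_getD M n i j hrow hi (by omega), pvDropD,
    pvW_getD M n i (j+1) hrow hi (by omega)]

theorem pvRowV (M : List (List Int)) (n i : Nat) (hrow : ∀ r ∈ M, n ≤ r.length)
    (hi1 : i + 1 < M.length) :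
    ((List.range n).map (fun j => pvG M M.length n i j 1 0)).sum
      = pvPairs (pvW M n i) (pvW M n (i+1)) := by
  rw [pvPairs_sum]
  rw [show min (pvW M n i).length (pvW M n (i+1)).length = n from by
    simp [pvW_len M n i hrow (by omega), pvW_len M n (i+1) hrow hi1]]
  apply congrArg
  apply List.map_congr_left
  intro j hj
  have hjn : j < n := List.mem_range.mp hj
  rw [pvW_getD M n i j hrow (by omega) hjn, pvW_getD M n (i+1) j hrow hi1 hjn]
  simp only [pvG, add_zero]
  rw [show ((i:Int) + 1) = (((i+1:Nat)):Int) from by push_cast; ring]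
  refine if_congr ?_ rfl rfl
  constructor
  · rintro ⟨h1, _, _, _, _, h6⟩; exact ⟨h1, h6⟩
  · rintro ⟨h1, h6⟩; exact ⟨h1, by omega, by omega, by omega, by omega, h6⟩

theorem pvRowD (M : List (List Int)) (n i : Nat) (hrow : ∀ r ∈ M, n ≤ r.length)
    (hi1 : i + 1 < M.length) :
    ((List.range n).map (fun j => pvG M M.length n i j 1 1)).sum
      = pvPairs (pvW M n i) ((pvW M n (i+1)).drop 1) := by
  rw [pvPairs_sum]
  rw [show min (pvW M n i).length ((pvW M n (i+1)).drop 1).length = n - 1 from by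
    simp [pvW_len M n i hrow (by omega), pvW_len M n (i+1) hrow hi1]]
  have hL : ∀ j ∈ List.range n, pvG M M.length n i j 1 1
      = (fun j => if j < n - 1 then (if pvRd M i j = 1 ∧ pvRd M ((i+1:Nat)) ((j+1:Nat)) = 1 then (1:Int) else 0) else 0) j := by
    intro j hj
    have hjn : j < n := List.mem_range.mp hj
    dsimp only
    by_cases hb : j < n - 1
    · rw [if_pos hb]
      simp only [pvG]
      rw [show ((i:Int) + 1) = (((i+1:Nat)):Int) from by push_cast; ring,
        show ((j:Int) + 1) = (((j+1:Nat)):Int) from by push_cast; ring]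
      refine if_congr ?_ rfl rfl
      constructor
      · rintro ⟨h1, _, _, _, _, h6⟩; exact ⟨h1, h6⟩
      · rintro ⟨h1, h6⟩; exact ⟨h1, by omega, by omega, by omega, by omega, h6⟩
    · rw [if_neg hb]
      simp only [pvG]
      rw [if_neg]
      rintro ⟨_, _, _, _, h5, _⟩; omega
  have hmap : (List.range n).map (fun j => pvG M M.length n i j 1 1)
      = (List.range n).map (fun j => if j < n - 1 then (if pvRd M i j = 1 ∧ pvRd M ((i+1:Nat)) ((j+1:Nat)) = 1 then (1:Int) else 0) else 0) :=
    List.map_congr_left hL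
  rw [hmap, pvSumGuard (n-1) n (by omega)]
  apply congrArg
  apply List.map_congr_left
  intro j hj
  have hjn : j < n - 1 := List.mem_range.mp hj
  rw [pvW_getD M n i j hrow (by omega) (by omega), pvDropD,
    pvW_getD M n (i+1) (j+1) hrow hi1 (by omega)]

theorem pvRowA (M : List (List Int)) (n i : Nat) (hrow : ∀ r ∈ M, n ≤ r.length)
    (hi1 : i + 1 < M.length) :
    ((List.range n).map (fun j => pvG M M.length n i j 1 (-1))).sum
      = pvPairs ((pvW M n i).drop 1) (pvW M n (i+1)) := by
  rw [pvPairs_sum]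
  rw [show min ((pvW M n i).drop 1).length (pvW M n (i+1)).length = n - 1 from by
    simp [pvW_len M n i hrow (by omega), pvW_len M n (i+1) hrow hi1]]
  rw [pvSumShift n _ (by
    intro _
    simp only [pvG]
    rw [if_neg]
    rintro ⟨_, _, _, h4, _, _⟩
    simp at h4)]
  apply congrArg
  apply List.map_congr_left
  intro j hj
  have hjn : j < n - 1 := List.mem_range.mp hj
  rw [pvDropD, pvW_getD M n i (j+1) hrow (by omega) (by omega),
    pvW_getD M n (i+1) j hrow hi1 (by omega)]
  simp only [pvG]
  rw [show (((j+1:Nat)):Int) + -1 = ((j:Nat):Int) from by push_cast; ring,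
    show ((i:Int) + 1) = (((i+1:Nat)):Int) from by push_cast; ring]
  refine if_congr ?_ rfl rfl
  constructor
  · rintro ⟨h1, _, _, _, _, h6⟩; exact ⟨h1, h6⟩
  · rintro ⟨h1, h6⟩; exact ⟨h1, by omega, by omega, by omega, by omega, h6⟩

theorem pvRowZero (M : List (List Int)) (n i j : Nat) (b : Int)
    (hlast : ¬ i + 1 < M.length) : pvG M M.length n i j 1 b = 0 := by
  simp only [pvG]
  rw [if_neg]
  rintro ⟨_, _, h3, _, _, _⟩
  omega

theorem pvMapSum {α : Type} (d : α) (L : List α) (g : α → Int) :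
    (L.map g).sum = ((List.range L.length).map (fun i => g (L.getD i d))).sum := by
  induction L with
  | nil => simp
  | cons x L ih =>
    simp only [List.map_cons, List.sum_cons, List.length_cons]
    rw [List.range_succ_eq_map]
    simp only [List.map_cons, List.sum_cons, List.map_map]
    have heq : List.map ((fun i => g ((x :: L).getD i d)) ∘ Nat.succ) (List.range L.length)
        = List.map (fun i => g (L.getD i d)) (List.range L.length) := by
      apply List.map_congr_left; intro j hj; simp [List.getD]
    rw [heq, ih]
    simp [List.getD]

theorem pvGetD_map_take (M : List (List Int)) (n i : Nat) (hi : i < M.length) :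
    (M.map (fun r => r.take n)).getD i [] = pvW M n i := by
  rw [pvGetD_at _ _ i (by simpa using hi), List.getElem_map, pvW, pvGetD_at M [] i hi]

theorem pvAlt_eq (M : List (List Int)) :
    count_connections_alt M
      = ((List.range M.length).map
          (fun i => pvPairs (pvW M (M.headD []).length i) ((pvW M (M.headD []).length i).drop 1))).sum
        + ((List.range (M.length - 1)).map (fun i =>
             pvPairs (pvW M (M.headD []).length i) (pvW M (M.headD []).length (i+1))
               + pvPairs (pvW M (M.headD []).length i) ((pvW M (M.headD []).length (i+1)).drop 1)
               + pvPairs ((pvW M (M.headD []).length i).drop 1) (pvW M (M.headD []).length (i+1)))).sum := by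
  simp only [count_connections_alt]
  rw [PySem.List.foldl_add]
  rw [show (fun (c : Int) (p : List Int × List Int) =>
        c + pvPairs p.1 p.2 + pvPairs p.1 (p.2.drop 1) + pvPairs (p.1.drop 1) p.2)
      = (fun c p => c + (pvPairs p.1 p.2 + pvPairs p.1 (p.2.drop 1) + pvPairs (p.1.drop 1) p.2)) from by
    funext c p; ring]
  rw [PySem.List.foldl_add]
  simp only [zero_add]
  congr 1
  · rw [pvMapSum ([] : List Int) (M.map (fun r => r.take (M.headD []).length)) (fun r => pvPairs r (r.drop 1))]
    simp only [List.length_map]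
    apply congrArg
    apply List.map_congr_left
    intro i hi
    have him : i < M.length := List.mem_range.mp hi
    rw [pvGetD_map_take M _ i him]
  · rw [pvZipSum ([] : List Int)
      (fun x y => pvPairs x y + pvPairs x (y.drop 1) + pvPairs (x.drop 1) y)]
    rw [show min (M.map (fun r => r.take (M.headD []).length)).length
        ((M.map (fun r => r.take (M.headD []).length)).drop 1).length = M.length - 1 from by
      simp]
    apply congrArg
    apply List.map_congr_left
    intro i hi
    have him : i < M.length - 1 := List.mem_range.mp hi
    rw [pvDropD, pvGetD_map_take M _ i (by omega), pvGetD_map_take M _ (i+1) (by omega)]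

theorem pvCells_eq (M : List (List Int)) (n : Nat) (hrow : ∀ r ∈ M, n ≤ r.length) :
    ((List.range M.length).map (fun i => ((List.range n).map (pvCellB M M.length n i)).sum)).sum
      = ((List.range M.length).map (fun i => pvPairs (pvW M n i) ((pvW M n i).drop 1))).sum
        + ((List.range (M.length - 1)).map (fun i =>
             pvPairs (pvW M n i) (pvW M n (i+1))
               + pvPairs (pvW M n i) ((pvW M n (i+1)).drop 1)
               + pvPairs ((pvW M n i).drop 1) (pvW M n (i+1)))).sum := by
  have hsplit : ∀ i ∈ List.range M.length,
      ((List.range n).map (pvCellB M M.length n i)).sum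
        = pvPairs (pvW M n i) ((pvW M n i).drop 1)
          + (((List.range n).map (fun j => pvG M M.length n i j 1 (-1))).sum
             + ((List.range n).map (fun j => pvG M M.length n i j 1 0)).sum
             + ((List.range n).map (fun j => pvG M M.length n i j 1 1)).sum) := by
    intro i hi
    have him : i < M.length := List.mem_range.mp hi
    have h1 : (List.range n).map (pvCellB M M.length n i)
        = (List.range n).map (fun j =>
            pvG M M.length n i j 0 1
              + (pvG M M.length n i j 1 (-1) + pvG M M.length n i j 1 0 + pvG M M.length n i j 1 1)) := by
      apply List.map_congr_left
      intro j hj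
      rw [pvCellB_split]
      ring
    rw [h1, PySem.List.sum_map_add_int, PySem.List.sum_map_add_int, PySem.List.sum_map_add_int,
      pvRowH M n i hrow him]
  have h2 : (List.range M.length).map (fun i => ((List.range n).map (pvCellB M M.length n i)).sum)
      = (List.range M.length).map (fun i =>
          pvPairs (pvW M n i) ((pvW M n i).drop 1)
            + (((List.range n).map (fun j => pvG M M.length n i j 1 (-1))).sum
               + ((List.range n).map (fun j => pvG M M.length n i j 1 0)).sum
               + ((List.range n).map (fun j => pvG M M.length n i j 1 1)).sum)) :=
    List.map_congr_left hsplit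
  rw [h2, PySem.List.sum_map_add_int]
  congr 1
  have h3 : (List.range M.length).map (fun i =>
        ((List.range n).map (fun j => pvG M M.length n i j 1 (-1))).sum
          + ((List.range n).map (fun j => pvG M M.length n i j 1 0)).sum
          + ((List.range n).map (fun j => pvG M M.length n i j 1 1)).sum)
      = (List.range M.length).map (fun i => if i < M.length - 1 then
          (pvPairs (pvW M n i) (pvW M n (i+1))
            + pvPairs (pvW M n i) ((pvW M n (i+1)).drop 1)
            + pvPairs ((pvW M n i).drop 1) (pvW M n (i+1))) else 0) := by
    apply List.map_congr_left
    intro i hi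
    have him : i < M.length := List.mem_range.mp hi
    by_cases hb : i < M.length - 1
    · rw [if_pos hb]
      rw [pvRowA M n i hrow (by omega), pvRowV M n i hrow (by omega), pvRowD M n i hrow (by omega)]
      ring
    · rw [if_neg hb]
      have hz : ∀ (b : Int), ((List.range n).map (fun j => pvG M M.length n i j 1 b)).sum = 0 := by
        intro b
        have : (List.range n).map (fun j => pvG M M.length n i j 1 b)
            = (List.range n).map (fun _ => (0:Int)) := by
          apply List.map_congr_left
          intro j hj
          exact pvRowZero M n i j b (by omega)
        rw [this]
        simp
      rw [hz, hz, hz]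
      ring
  rw [h3, pvSumGuard (M.length - 1) M.length (by omega)]

theorem pvMainB (matrix : List (List Int))
    (hrow : ∀ row ∈ matrix, (matrix.headD []).length ≤ row.length) :
    ((List.range matrix.length).map
        (fun i => ((List.range (matrix.headD []).length).map
          (pvCellB matrix matrix.length (matrix.headD []).length i)).sum)).sum
      = count_connections_alt matrix := by
  rw [pvCells_eq matrix (matrix.headD []).length hrow, pvAlt_eq]

-- ===== VERDICT (by name: the statement is the Claim_ definition above) =====
theorem count_connections_spec : Claim_equal_count_connections := by
  intro matrix _ hpre
  unfold Spec_count_connections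
  rw [pvA_sum matrix hpre.2, pvMainB matrix hpre.2]
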